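-- pv_equiv track=rewrite | github.com/rd162/OSS_Migration | tools/graph_analysis/strict_function_audit.py | _is_third_party
-- ===== SOURCE A (Python) =====
-- from typing import Dict, List, Optional, Set, Tuple
--
-- THIRD_PARTY_PREFIXES: Set[str] = {
--     "QRcode", "QR", "PHPMailer", "SMTP", "SphinxClient",
--     "gettext_reader", "FileReader", "Text_LanguageDetect",
--     "MiniTemplator", "Mobile_Detect", "floIcon", "jimIcon",
--     "HOTP", "OTP", "TOTP", "Minifier", "FrameFiller",
--     "Db_Mysql", "Db_Mysqli", "Publisher", "Subscriber", "Base32",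
--     "CachedFileReader", "StringReader", "StreamReader",
--     "QRrs", "QRmask", "QRencode", "QRsplit", "QRrawcode",
--     "QRimage", "qrstr", "QRspec", "phpmailerException", "Db_Pgsql",
--     "ttrss/lib/",
--     "ttrss/update_daemon2.php", "ttrss/update.php",
--     "FeedParser", "FeedItem", "FeedItem_Atom", "FeedItem_RSS",
--     "FeedItem_Common", "FeedEnclosure",
--     "LanguageDetect",
--     "ttrss/include/colors.php",
-- }
--
-- def _is_third_party(file_path: str, qname: str) -> bool:
--     for prefix in THIRD_PARTY_PREFIXES:
--         if file_path.startswith(prefix) or qname.startswith(prefix):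
--             return True
--         if "/" in prefix:
--             norm = prefix if prefix.endswith("/") else prefix + "/"
--             if file_path.startswith(norm):
--                 return True
--     return False
-- ===== SOURCE B (Python) =====
-- from typing import Set
--
-- THIRD_PARTY_PREFIXES: Set[str] = {
--     "QRcode", "QR", "PHPMailer", "SMTP", "SphinxClient",
--     "gettext_reader", "FileReader", "Text_LanguageDetect",
--     "MiniTemplator", "Mobile_Detect", "floIcon", "jimIcon",
--     "HOTP", "OTP", "TOTP", "Minifier", "FrameFiller",
--     "Db_Mysql", "Db_Mysqli", "Publisher", "Subscriber", "Base32",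
--     "CachedFileReader", "StringReader", "StreamReader",
--     "QRrs", "QRmask", "QRencode", "QRsplit", "QRrawcode",
--     "QRimage", "qrstr", "QRspec", "phpmailerException", "Db_Pgsql",
--     "ttrss/lib/",
--     "ttrss/update_daemon2.php", "ttrss/update.php",
--     "FeedParser", "FeedItem", "FeedItem_Atom", "FeedItem_RSS",
--     "FeedItem_Common", "FeedEnclosure",
--     "LanguageDetect",
--     "ttrss/include/colors.php",
-- }
--
-- # Inverted lookup: instead of scanning every prefix with startswith, take each
-- # distinct prefix LENGTH L and hash-look-up the leading substring s[:L] in the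
-- # prefix set.  "s starts with some prefix" == "some leading substring of s is
-- # in the set", so the per-prefix scan disappears (the original's extra
-- # prefix+'/' check is redundant: startswith(p+'/') implies startswith(p)).
-- _PREFIX_SET = frozenset(THIRD_PARTY_PREFIXES)
-- _PREFIX_LENS = sorted({len(p) for p in THIRD_PARTY_PREFIXES})
--
-- def _is_third_party(file_path: str, qname: str) -> bool:
--     return any(file_path[:L] in _PREFIX_SET or qname[:L] in _PREFIX_SET
--                for L in _PREFIX_LENS)
-- ===== Notes on version B (the rewrite author's own statement) =====
-- stated objective: alternative
-- what changed: Inverts the search: instead of scanning all 46 prefixes with startswith (plus a redundant prefix+'/' re-check, dead since startswith(p+'/') implies startswith(p)), B hash-looks-up each leading substring s[:L], for the ~20 distinct prefix lengths L, in a frozenset of the prefixes.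
import Mathlib
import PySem

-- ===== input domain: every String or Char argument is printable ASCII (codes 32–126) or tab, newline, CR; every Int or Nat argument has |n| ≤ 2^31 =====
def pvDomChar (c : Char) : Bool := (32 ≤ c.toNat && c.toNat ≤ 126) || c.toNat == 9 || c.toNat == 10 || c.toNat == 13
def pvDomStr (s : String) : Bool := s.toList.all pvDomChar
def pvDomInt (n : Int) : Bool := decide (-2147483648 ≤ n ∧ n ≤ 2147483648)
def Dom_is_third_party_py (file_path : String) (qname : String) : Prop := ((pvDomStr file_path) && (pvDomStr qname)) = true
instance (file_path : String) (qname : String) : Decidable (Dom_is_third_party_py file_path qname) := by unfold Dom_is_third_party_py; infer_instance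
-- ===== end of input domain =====

-- B inverts A's search: instead of scanning every prefix with startswith (A's extra
-- prefix+'/' branch is dead code), B looks up each leading substring s[:L], for the
-- distinct prefix lengths L, in a set of the prefixes; same results, alternative algorithm.


-- ===== PORT A =====
-- THIRD_PARTY_PREFIXES, in source order (Python set iteration order is unspecified;
-- the loop's result is order-independent, so source order is a faithful choice).
def pvThirdPartyPrefixes : List String :=
  ["QRcode", "QR", "PHPMailer", "SMTP", "SphinxClient",
   "gettext_reader", "FileReader", "Text_LanguageDetect",
   "MiniTemplator", "Mobile_Detect", "floIcon", "jimIcon",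
   "HOTP", "OTP", "TOTP", "Minifier", "FrameFiller",
   "Db_Mysql", "Db_Mysqli", "Publisher", "Subscriber", "Base32",
   "CachedFileReader", "StringReader", "StreamReader",
   "QRrs", "QRmask", "QRencode", "QRsplit", "QRrawcode",
   "QRimage", "qrstr", "QRspec", "phpmailerException", "Db_Pgsql",
   "ttrss/lib/",
   "ttrss/update_daemon2.php", "ttrss/update.php",
   "FeedParser", "FeedItem", "FeedItem_Atom", "FeedItem_RSS",
   "FeedItem_Common", "FeedEnclosure",
   "LanguageDetect",
   "ttrss/include/colors.php"]

-- the 'for prefix in THIRD_PARTY_PREFIXES' loop with its early returns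
def pvLoopA (file_path : String) (qname : String) : List String → Bool
  | [] => false
  | prefix_ :: rest =>
    if PySem.Str.startswith file_path prefix_ || PySem.Str.startswith qname prefix_ then
      true
    else if PySem.Str.isIn "/" prefix_ then
      let norm := if PySem.Str.endswith prefix_ "/" then prefix_ else prefix_ ++ "/"
      if PySem.Str.startswith file_path norm then true
      else pvLoopA file_path qname rest
    else pvLoopA file_path qname rest

def is_third_party_py (file_path : String) (qname : String) : Bool :=
  pvLoopA file_path qname pvThirdPartyPrefixes

-- ===== PORT B =====
-- _PREFIX_SET = frozenset(THIRD_PARTY_PREFIXES)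
def pvPrefixSet : PySem.Set String := PySem.Set.ofList pvThirdPartyPrefixes

-- _PREFIX_LENS = sorted({len(p) for p in THIRD_PARTY_PREFIXES})
def pvPrefixLens : List Int :=
  PySem.List.sorted (PySem.Set.ofList (pvThirdPartyPrefixes.map PySem.Str.len)) (fun x => x) false

-- any(file_path[:L] in _PREFIX_SET or qname[:L] in _PREFIX_SET for L in _PREFIX_LENS)
def is_third_party_py_alt (file_path : String) (qname : String) : Bool :=
  pvPrefixLens.any (fun L =>
    PySem.Set.contains pvPrefixSet (PySem.Str.slice file_path none (some L))
      || PySem.Set.contains pvPrefixSet (PySem.Str.slice qname none (some L)))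

-- ===== PRECONDITION & SPEC =====
def Spec_is_third_party_py (file_path : String) (qname : String) (out : Bool) : Prop := out = is_third_party_py_alt file_path qname
instance (file_path : String) (qname : String) (out : Bool) : Decidable (Spec_is_third_party_py file_path qname out) := by unfold Spec_is_third_party_py; infer_instance

-- ===== CLAIM (what is proved, stated in full; the proofs are below) =====
def Claim_equal_is_third_party_py : Prop := ∀ (file_path : String) (qname : String), Dom_is_third_party_py file_path qname → Spec_is_third_party_py file_path qname (is_third_party_py file_path qname)

-- ===== LEMMAS AND PROOFS =====

-- startswith is antitone in the prefix: a match of p ++ "/" is a match of p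
theorem startswith_append_slash (s p : String)
    (h : PySem.Str.startswith s (p ++ "/") = true) :
    PySem.Str.startswith s p = true := by
  rw [PySem.Str.startswith_eq, PySem.Chars.startswith_iff] at h ⊢
  rw [String.toList_append] at h
  exact (List.prefix_append p.toList "/".toList).trans h

-- A's loop equals the disjunction of two per-string any-startswith passes, for ANY prefix list
theorem loopA_eq_any (file_path qname : String) (ps : List String) :
    pvLoopA file_path qname ps
      = (ps.any (fun p => PySem.Str.startswith file_path p)
          || ps.any (fun p => PySem.Str.startswith qname p)) := by
  induction ps with
  | nil => rfl
  | cons p rest ih =>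
    cases hf : PySem.Str.startswith file_path p with
    | true =>
      simp only [pvLoopA, List.any_cons, hf, Bool.true_or]
      rw [if_pos trivial]
    | false =>
      cases hq : PySem.Str.startswith qname p with
      | true =>
        simp only [pvLoopA, List.any_cons, hf, hq, Bool.false_or, Bool.true_or, Bool.or_true]
        rw [if_pos trivial]
      | false =>
        simp only [pvLoopA, List.any_cons, hf, hq, Bool.false_or, Bool.or_false]
        rw [if_neg (by simp)]
        by_cases h2 : PySem.Str.isIn "/" p = true
        · rw [if_pos h2]
          by_cases h3 : PySem.Str.endswith p "/" = true
          · rw [if_pos h3, if_neg (by simp only [hf]; simp)]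
            exact ih
          · rw [if_neg h3]
            have hslash : PySem.Str.startswith file_path (p ++ "/") = false := by
              cases hx : PySem.Str.startswith file_path (p ++ "/") with
              | false => rfl
              | true => exact absurd (startswith_append_slash file_path p hx) (by simp only [hf]; exact Bool.false_ne_true)
            rw [if_neg (by simp only [hslash]; simp)]
            exact ih
        · rw [if_neg h2]
          exact ih

-- any distributes over a pointwise disjunction
theorem any_or_split (xs : List Int) (f g : Int → Bool) :
    (xs.any fun x => f x || g x) = (xs.any f || xs.any g) := by
  induction xs with
  | nil => rfl
  | cons x xs ih => simp [List.any_cons, ih, Bool.or_assoc, Bool.or_left_comm]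

-- every length of a prefix occurs in _PREFIX_LENS
theorem len_mem_prefixLens (p : String) (hp : p ∈ pvThirdPartyPrefixes) :
    PySem.Str.len p ∈ pvPrefixLens := by
  unfold pvPrefixLens
  rw [PySem.List.mem_sorted, PySem.Set.mem_ofList]
  exact List.mem_map.mpr ⟨p, hp, rfl⟩

-- B's length-indexed lookup pass over one string equals A's any-startswith pass over it
theorem lens_lookup_eq_any (s : String) :
    (pvPrefixLens.any fun L =>
        PySem.Set.contains pvPrefixSet (PySem.Str.slice s none (some L)))
      = pvThirdPartyPrefixes.any (fun p => PySem.Str.startswith s p) := by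
  apply Bool.eq_iff_iff.mpr
  simp only [List.any_eq_true]
  constructor
  · rintro ⟨L, hL, hc⟩
    have hmem : PySem.Str.slice s none (some L) ∈ pvThirdPartyPrefixes :=
      PySem.Set.mem_ofList _ _ |>.mp ((PySem.Set.contains_iff _ _).mp hc)
    -- 0 ≤ L since L is the length of some prefix
    have hL0 : 0 ≤ L := by
      unfold pvPrefixLens at hL
      rw [PySem.List.mem_sorted, PySem.Set.mem_ofList] at hL
      obtain ⟨p, _, hlen⟩ := List.mem_map.mp hL
      rw [← hlen, PySem.Str.len_eq]
      exact Int.natCast_nonneg _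
    refine ⟨_, hmem, ?_⟩
    rw [PySem.Str.startswith_eq, PySem.Chars.startswith_iff, PySem.Str.toList_slice,
        PySem.Chars.slice_eq_listSlice, PySem.List.slice_to _ hL0]
    exact List.take_prefix _ _
  · rintro ⟨p, hp, hsw⟩
    refine ⟨PySem.Str.len p, len_mem_prefixLens p hp, ?_⟩
    have hpre : p.toList <+: s.toList := by
      rw [PySem.Str.startswith_eq, PySem.Chars.startswith_iff] at hsw
      exact hsw
    have hslice : PySem.Str.slice s none (some (PySem.Str.len p)) = p := by
      apply String.toList_inj.mp
      rw [PySem.Str.toList_slice, PySem.Chars.slice_eq_listSlice, PySem.Str.len_eq,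
          PySem.List.slice_to _ (Int.natCast_nonneg _), Int.toNat_natCast]
      exact (List.prefix_iff_eq_take.mp hpre).symm
    rw [hslice]
    exact (PySem.Set.contains_iff _ _).mpr ((PySem.Set.mem_ofList _ _).mpr hp)

-- ===== VERDICT (by name: the statement is the Claim_ definition above) =====
theorem is_third_party_py_spec : Claim_equal_is_third_party_py := by
  intro file_path qname _
  unfold Spec_is_third_party_py is_third_party_py is_third_party_py_alt
  rw [loopA_eq_any, any_or_split, lens_lookup_eq_any, lens_lookup_eq_any]
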